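-- pv_equiv track=rewrite | github.com/brunothiago/painel_dmp_pc32 | python/comparar_snapshots_base.py | _summarize_status_changes
-- ===== SOURCE A (Python) =====
-- from collections import Counter
--
-- SUMMARY_STATUS_FIELDS = [
--     "status_suspensiva_calc",
--     "status_pub_licitacao_calc",
--     "status_homolog_licitacao_calc",
--     "status_inicio_obra_calc",
--     "status_regra_casa_civil_calc",
--     "urgencia_suspensiva_calc",
--     "fase_atual_calc",
-- ]
--
-- def _summarize_status_changes(detail_rows: list[dict[str, str]]) -> dict[str, int]:
--     counter = Counter()
--     for row in detail_rows:
--         if row["tipo_alteracao"] != "alterado":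
--             continue
--         field = row["campo"]
--         if field in SUMMARY_STATUS_FIELDS:
--             counter[field] += 1
--     return {field: counter.get(field, 0) for field in SUMMARY_STATUS_FIELDS}
-- ===== SOURCE B (Python) =====
-- SUMMARY_STATUS_FIELDS = [
--     "status_suspensiva_calc",
--     "status_pub_licitacao_calc",
--     "status_homolog_licitacao_calc",
--     "status_inicio_obra_calc",
--     "status_regra_casa_civil_calc",
--     "urgencia_suspensiva_calc",
--     "fase_atual_calc",
-- ]
--
-- def _summarize_status_changes(detail_rows: list[dict[str, str]]) -> dict[str, int]:
--     return {
--         field: sum(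
--             1
--             for row in detail_rows
--             if row["tipo_alteracao"] == "alterado" and row["campo"] == field
--         )
--         for field in SUMMARY_STATUS_FIELDS
--     }
-- ===== Notes on version B (the rewrite author's own statement) =====
-- stated objective: simpler
-- what changed: Replaces the single-pass Counter accumulation plus final comprehension with a direct dict comprehension that, for each status field, scans detail_rows and counts the 'alterado' rows touching that field; no intermediate counter is built.
import Mathlib
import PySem

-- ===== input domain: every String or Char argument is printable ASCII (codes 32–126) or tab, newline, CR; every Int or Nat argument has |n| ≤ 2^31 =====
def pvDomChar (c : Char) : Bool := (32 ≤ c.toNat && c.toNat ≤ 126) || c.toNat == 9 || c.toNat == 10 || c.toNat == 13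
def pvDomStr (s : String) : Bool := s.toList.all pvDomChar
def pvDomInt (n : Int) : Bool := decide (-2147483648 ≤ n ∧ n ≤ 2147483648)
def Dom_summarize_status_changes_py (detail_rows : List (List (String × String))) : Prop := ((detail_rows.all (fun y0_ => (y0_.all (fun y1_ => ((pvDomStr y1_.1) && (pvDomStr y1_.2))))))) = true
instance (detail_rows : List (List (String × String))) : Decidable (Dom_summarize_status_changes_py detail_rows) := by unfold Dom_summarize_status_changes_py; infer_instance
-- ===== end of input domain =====

-- ===== PORT A =====
-- B replaces A's single-pass Counter with a per-field counting comprehension (simpler); return value only.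
def pvFields : List String :=
  ["status_suspensiva_calc", "status_pub_licitacao_calc", "status_homolog_licitacao_calc",
   "status_inicio_obra_calc", "status_regra_casa_civil_calc", "urgencia_suspensiva_calc",
   "fase_atual_calc"]

-- literal port of A: fold building a Counter, then a comprehension over the fields
def summarize_status_changes_py (detail_rows : List (List (String × String))) : List (String × Int) :=
  let counter : PySem.Dict String Int :=
    detail_rows.foldl
      (fun c row =>
        if ((PySem.Dict.mk row).get? "tipo_alteracao").getD "" ≠ "alterado" then c
        else
          let field := ((PySem.Dict.mk row).get? "campo").getD ""
          if field ∈ pvFields then c.modify field 0 (· + 1) else c)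
      PySem.Dict.empty
  pvFields.map (fun f => (f, counter.getD f 0))

-- ===== PORT B =====
-- literal port of B: for each field, count the matching rows directly
def summarize_status_changes_py_alt (detail_rows : List (List (String × String))) : List (String × Int) :=
  pvFields.map (fun f =>
    (f, (detail_rows.countP (fun row =>
          (((PySem.Dict.mk row).get? "tipo_alteracao").getD "" == "alterado")
            && (((PySem.Dict.mk row).get? "campo").getD "" == f)) : Int)))

-- ===== PRECONDITION & SPEC =====
-- Pre_ excludes exactly the rows on which Python A raises KeyError: a row without key
-- "tipo_alteracao", or an "alterado" row without key "campo".
def Pre_summarize_status_changes_py (detail_rows : List (List (String × String))) : Prop :=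
  ∀ row ∈ detail_rows,
    (PySem.Dict.mk row).contains "tipo_alteracao" = true ∧
    (((PySem.Dict.mk row).get? "tipo_alteracao").getD "" = "alterado" →
      (PySem.Dict.mk row).contains "campo" = true)
instance (detail_rows : List (List (String × String))) : Decidable (Pre_summarize_status_changes_py detail_rows) := by unfold Pre_summarize_status_changes_py; infer_instance

def pvWitness_summarize_status_changes_py : (List (List (String × String))) :=
  [[("tipo_alteracao", "alterado"), ("campo", "fase_atual_calc")],
   [("tipo_alteracao", "novo")]]

def Spec_summarize_status_changes_py (detail_rows : List (List (String × String))) (out : List (String × Int)) : Prop := out = summarize_status_changes_py_alt detail_rows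
instance (detail_rows : List (List (String × String))) (out : List (String × Int)) : Decidable (Spec_summarize_status_changes_py detail_rows out) := by unfold Spec_summarize_status_changes_py; infer_instance

-- ===== CLAIM (what is proved, stated in full; the proofs are below) =====
def Claim_equal_summarize_status_changes_py : Prop := ∀ (detail_rows : List (List (String × String))), Dom_summarize_status_changes_py detail_rows → Pre_summarize_status_changes_py detail_rows → Spec_summarize_status_changes_py detail_rows (summarize_status_changes_py detail_rows)

-- ===== LEMMAS AND PROOFS =====
lemma counter_inv (rows : List (List (String × String))) (c : PySem.Dict String Int)
    (f : String) (hf : f ∈ pvFields) :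
    (rows.foldl
      (fun c row =>
        if ((PySem.Dict.mk row).get? "tipo_alteracao").getD "" ≠ "alterado" then c
        else
          let field := ((PySem.Dict.mk row).get? "campo").getD ""
          if field ∈ pvFields then c.modify field 0 (· + 1) else c)
      c).getD f 0
    = c.getD f 0 + (rows.countP (fun row =>
        (((PySem.Dict.mk row).get? "tipo_alteracao").getD "" == "alterado")
          && (((PySem.Dict.mk row).get? "campo").getD "" == f)) : Int) := by
  induction rows generalizing c with
  | nil => simp
  | cons row rest ih =>
    simp only [List.foldl_cons, List.countP_cons]
    by_cases ht : ((PySem.Dict.mk row).get? "tipo_alteracao").getD "" = "alterado"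
    · simp only [ht, ne_eq, not_true_eq_false, if_false]
      by_cases hm : ((PySem.Dict.mk row).get? "campo").getD "" ∈ pvFields
      · simp only [hm, if_true]
        rw [ih]
        by_cases hc : ((PySem.Dict.mk row).get? "campo").getD "" = f
        · simp [hc, PySem.Dict.getD_modify_self]
          ring
        · rw [PySem.Dict.getD_modify_of_ne]
          · simp [hc]
          · exact Ne.symm hc
      · rw [ih]
        have hc : ((PySem.Dict.mk row).get? "campo").getD "" ≠ f := fun h => hm (h ▸ hf)
        simp [hm, hc]
    · simp only [ht, ne_eq, not_false_eq_true, if_true]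
      rw [ih]
      simp [ht]

-- ===== VERDICT (by name: the statement is the Claim_ definition above) =====
theorem summarize_status_changes_py_spec : Claim_equal_summarize_status_changes_py := by
  intro rows _ _
  unfold Spec_summarize_status_changes_py summarize_status_changes_py summarize_status_changes_py_alt
  refine List.map_congr_left (fun f hf => ?_)
  rw [counter_inv rows PySem.Dict.empty f hf]
  simp
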